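-- pv_equiv track=rewrite | github.com/timescast/archives | mine/d/patterns/paterns3/main.py | validlong
-- ===== SOURCE A (Python) =====
-- def validlong(arr,K):
--     n = len(arr)
--     prefix = [0]*n
--     prefix[0] = arr[0]
--     for i in range(1,n):
--         prefix[i] = prefix[i-1]+arr[i]
--     for i in range(n):
--         if prefix[i] > K:
--             return i
-- ===== SOURCE B (Python) =====
-- def validlong(arr, K):
--     s = arr[0]
--     if s > K:
--         return 0
--     for i in range(1, len(arr)):
--         s += arr[i]
--         if s > K:
--             return i
-- ===== Notes on version B (the rewrite author's own statement) =====
-- stated objective: faster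
-- what changed: B replaces A's two passes over a materialised prefix array (build it all, then scan it) with a single pass maintaining only a scalar running sum, returning the index as soon as it exceeds K.
import Mathlib
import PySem

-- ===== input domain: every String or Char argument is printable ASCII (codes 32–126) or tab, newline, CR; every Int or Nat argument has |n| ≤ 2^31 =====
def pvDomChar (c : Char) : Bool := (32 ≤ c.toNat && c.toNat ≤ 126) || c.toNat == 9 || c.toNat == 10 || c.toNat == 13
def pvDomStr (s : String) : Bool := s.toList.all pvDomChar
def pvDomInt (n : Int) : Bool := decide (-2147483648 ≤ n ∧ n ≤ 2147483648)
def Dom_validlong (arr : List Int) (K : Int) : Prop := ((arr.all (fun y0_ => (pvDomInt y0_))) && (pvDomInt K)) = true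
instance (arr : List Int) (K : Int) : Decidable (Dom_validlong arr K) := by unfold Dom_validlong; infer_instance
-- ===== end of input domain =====

-- B is a single pass with a scalar running sum, instead of A's build-prefix-array-then-scan two-loop form.
-- Pre_ excludes only the empty list, on which both Pythons raise IndexError (arr[0]).
-- ===== PORT A =====
-- loop "for i in range(1,n): prefix[i] = prefix[i-1]+arr[i]": the prefix array built so far,
-- extended each step by its last element plus arr[i]
def buildPrefix : List Int → List Int → List Int
  | [], p => p
  | x :: xs, p => buildPrefix xs (p ++ [p.getLastD 0 + x])

-- loop "for i in range(n): if prefix[i] > K: return i"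
def scanFirst (K : Int) : List Int → Int → Option Int
  | [], _ => none
  | p :: ps, i => if p > K then some i else scanFirst K ps (i + 1)

def validlong (arr : List Int) (K : Int) : Option Int :=
  match arr with
  | [] => none  -- Python raises IndexError here (prefix[0] = arr[0]); excluded by Pre_
  | x :: xs => scanFirst K (buildPrefix xs [x]) 0

-- ===== PORT B =====
def altGo (K : Int) : List Int → Int → Int → Option Int
  | [], _, _ => none
  | x :: xs, s, i =>
    let s' := s + x
    if s' > K then some i else altGo K xs s' (i + 1)

def validlong_alt (arr : List Int) (K : Int) : Option Int :=
  match arr with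
  | [] => none  -- Source B raises IndexError here (arr[0]); excluded by Pre_
  | x :: xs => if x > K then some 0 else altGo K xs x 1

-- ===== PRECONDITION & SPEC =====
-- Pre_ excludes exactly the empty list, where A raises IndexError.
def Pre_validlong (arr : List Int) (K : Int) : Prop := arr ≠ []
instance (arr : List Int) (K : Int) : Decidable (Pre_validlong arr K) := by unfold Pre_validlong; infer_instance
def pvWitness_validlong : List Int × Int := ([1, 2, 3], 2)
def Spec_validlong (arr : List Int) (K : Int) (out : Option Int) : Prop := out = validlong_alt arr K
instance (arr : List Int) (K : Int) (out : Option Int) : Decidable (Spec_validlong arr K out) := by unfold Spec_validlong; infer_instance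

-- ===== CLAIM (what is proved, stated in full; the proofs are below) =====
def Claim_equal_validlong : Prop := ∀ (arr : List Int) (K : Int), Dom_validlong arr K → Pre_validlong arr K → Spec_validlong arr K (validlong arr K)

-- ===== LEMMAS AND PROOFS =====
-- the running sums a+x1, a+x1+x2, … — the tail of the prefix array
def sums : List Int → Int → List Int
  | [], _ => []
  | x :: xs, a => (a + x) :: sums xs (a + x)

theorem buildPrefix_eq_sums (xs : List Int) : ∀ (p : List Int) (a : Int),
    p.getLastD 0 = a → buildPrefix xs p = p ++ sums xs a := by
  induction xs with
  | nil => intro p a _; simp [buildPrefix, sums]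
  | cons x xs ih =>
    intro p a hl
    have h2 : (p ++ [a + x]).getLastD 0 = a + x := by simp
    calc buildPrefix (x :: xs) p = buildPrefix xs (p ++ [p.getLastD 0 + x]) := rfl
      _ = buildPrefix xs (p ++ [a + x]) := by rw [hl]
      _ = (p ++ [a + x]) ++ sums xs (a + x) := ih _ _ h2
      _ = p ++ sums (x :: xs) a := by simp [sums]

theorem altGo_eq_scan (K : Int) (xs : List Int) : ∀ (s i : Int),
    altGo K xs s i = scanFirst K (sums xs s) i := by
  induction xs with
  | nil => intro s i; rfl
  | cons x xs ih =>
    intro s i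
    simp only [altGo, sums, scanFirst]
    split
    · rfl
    · exact ih _ _

-- ===== VERDICT (by name: the statement is the Claim_ definition above) =====
theorem validlong_spec : Claim_equal_validlong := by
  intro arr K _ hpre
  unfold Spec_validlong
  match arr with
  | [] => exact absurd rfl hpre
  | x :: xs =>
    show scanFirst K (buildPrefix xs [x]) 0 = _
    rw [buildPrefix_eq_sums xs [x] x (by simp)]
    simp only [List.cons_append, List.nil_append, scanFirst, validlong_alt]
    split
    · rfl
    · exact (altGo_eq_scan K xs x 1).symm
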